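-- pv_equiv track=rewrite | github.com/MatLopes23/Computacao-Evolutiva | T01/Algoritmo.py | indi_dif
-- ===== SOURCE A (Python) =====
-- def indi_dif(P, PO):
--     total=0
--     marcacoes=[0 for x in range(PO)]
--     for i in range(PO):
--         if marcacoes[i]==0:
--             marcacoes[i]=1
--             for j in range(PO):
--                 if P[i]==P[j]:
--                     marcacoes[j]=1
--             total+=1
--     return total
-- ===== SOURCE B (Python) =====
-- def indi_dif(P, PO):
--     seen = []
--     for i in range(PO):
--         x = P[i]
--         found = False
--         for v in seen:
--             if x == v:
--                 found = True
--                 break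
--         if not found:
--             seen.append(x)
--     return len(seen)
-- ===== Notes on version B (the rewrite author's own statement) =====
-- stated objective: simpler
-- what changed: Replaces A's 0/1 marking array (with a nested pass over all PO indices stamping every equal element) by a single growing 'seen' list of first occurrences whose length is the answer; no marking state is kept.
import Mathlib
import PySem

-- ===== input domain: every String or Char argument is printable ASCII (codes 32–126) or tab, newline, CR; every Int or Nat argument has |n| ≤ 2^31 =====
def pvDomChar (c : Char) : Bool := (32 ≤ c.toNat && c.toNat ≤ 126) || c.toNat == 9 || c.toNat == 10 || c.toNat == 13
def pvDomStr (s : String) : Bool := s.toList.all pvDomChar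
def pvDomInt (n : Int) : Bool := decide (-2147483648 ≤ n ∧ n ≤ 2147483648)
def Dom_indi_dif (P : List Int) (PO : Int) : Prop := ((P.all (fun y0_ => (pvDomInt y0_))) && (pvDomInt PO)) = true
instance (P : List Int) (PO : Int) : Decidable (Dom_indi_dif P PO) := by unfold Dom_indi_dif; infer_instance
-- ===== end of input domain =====

-- B replaces A's 0/1 marking array (and its stamping inner pass) by a growing list of
-- first occurrences whose length is the answer (objective: simpler).

-- ===== PORT A =====
-- inner loop "for j in range(PO): if P[i]==P[j]: marcacoes[j]=1"
def aInner (P : List Int) (PO : Int) (i : Int) (m : List Int) : List Int :=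
  (PySem.List.pyRange 0 PO).foldl
    (fun m j => if PySem.List.pyGetD P i 0 == PySem.List.pyGetD P j 0
                then m.set j.toNat 1 else m) m

-- outer loop body; indices come from range(PO), hence nonnegative, so .toNat is exact
def aStep (P : List Int) (PO : Int) (st : Int × List Int) (i : Int) : Int × List Int :=
  if PySem.List.pyGetD st.2 i 0 == 0 then
    (st.1 + 1, aInner P PO i (st.2.set i.toNat 1))
  else st

def indi_dif (P : List Int) (PO : Int) : Int :=
  ((PySem.List.pyRange 0 PO).foldl (aStep P PO)
    (0, (PySem.List.pyRange 0 PO).map (fun _ => (0 : Int)))).1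

-- ===== PORT B =====
-- explicit equality scan over `seen` (the for/break loop of Source B)
def altContains (x : Int) : List Int → Bool
  | [] => false
  | v :: vs => if x == v then true else altContains x vs

def bStep (P : List Int) (seen : List Int) (i : Int) : List Int :=
  let x := PySem.List.pyGetD P i 0
  if altContains x seen then seen else seen ++ [x]

def indi_dif_alt (P : List Int) (PO : Int) : Int :=
  (((PySem.List.pyRange 0 PO).foldl (bStep P) []).length : Int)

-- ===== PRECONDITION & SPEC =====
-- Pre_ excludes exactly the inputs where Python A raises IndexError: PO larger than len(P)
-- (negative PO is fine: the loops are empty and A returns 0).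
def Pre_indi_dif (P : List Int) (PO : Int) : Prop := PO ≤ (P.length : Int)
instance (P : List Int) (PO : Int) : Decidable (Pre_indi_dif P PO) := by
  unfold Pre_indi_dif; infer_instance

def pvWitness_indi_dif : List Int × Int := ([1, 2, 1], 3)

def Spec_indi_dif (P : List Int) (PO : Int) (out : Int) : Prop := out = indi_dif_alt P PO
instance (P : List Int) (PO : Int) (out : Int) : Decidable (Spec_indi_dif P PO out) := by
  unfold Spec_indi_dif; infer_instance

-- ===== CLAIM (what is proved, stated in full; the proofs are below) =====
def Claim_equal_indi_dif : Prop :=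
  ∀ (P : List Int) (PO : Int), Dom_indi_dif P PO → Pre_indi_dif P PO →
    Spec_indi_dif P PO (indi_dif P PO)

-- ===== LEMMAS AND PROOFS =====

lemma altContains_append_singleton (y x : Int) (s : List Int) :
    altContains y (s ++ [x]) = (altContains y s || (y == x)) := by
  induction s with
  | nil => by_cases h : y = x <;> simp [altContains, h]
  | cons v vs ih =>
    by_cases h : y = v <;> simp [altContains, h, ih]

lemma innerFold_length (P : List Int) (x : Int) (js : List Int) (m : List Int) :
    (js.foldl (fun m j => if x == PySem.List.pyGetD P j 0 then m.set j.toNat 1 else m) m).length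
      = m.length := by
  induction js generalizing m with
  | nil => rfl
  | cons jj rest ih =>
    simp only [List.foldl_cons]
    rw [ih]
    split <;> simp

lemma innerFold_get (P : List Int) (x : Int) (js : List Int)
    (hjs : ∀ j ∈ js, 0 ≤ j) (m : List Int) (j : Int) (h0 : 0 ≤ j)
    (h1 : j.toNat < m.length) :
    PySem.List.pyGetD
      (js.foldl (fun m j => if x == PySem.List.pyGetD P j 0 then m.set j.toNat 1 else m) m) j 0
      = if j ∈ js ∧ x = PySem.List.pyGetD P j 0 then 1 else PySem.List.pyGetD m j 0 := by
  induction js generalizing m with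
  | nil => simp
  | cons jj rest ih =>
    have hjj : 0 ≤ jj := hjs jj (by simp)
    have hrest : ∀ j ∈ rest, 0 ≤ j := fun j hj => hjs j (by simp [hj])
    simp only [List.foldl_cons]
    have hlen : (if x == PySem.List.pyGetD P jj 0 then m.set jj.toNat 1 else m).length
        = m.length := by split <;> simp
    rw [ih hrest _ (by rw [hlen]; exact h1)]
    have hget : PySem.List.pyGetD (if x == PySem.List.pyGetD P jj 0 then m.set jj.toNat 1 else m) j 0
        = if jj = j ∧ x = PySem.List.pyGetD P jj 0 then 1 else PySem.List.pyGetD m j 0 := by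
      by_cases hx2 : x = PySem.List.pyGetD P jj 0
      · rw [if_pos (beq_iff_eq.mpr hx2)]
        by_cases hj : jj = j
        · subst hj
          rw [if_pos ⟨rfl, hx2⟩,
              PySem.List.pyGetD_eq_getElem _ _ h0 (by simp; omega)]
          simp
        · rw [if_neg (fun h => hj h.1),
              PySem.List.pyGetD_eq_getElem _ _ h0 (by simp; omega),
              PySem.List.pyGetD_eq_getElem _ _ h0 (by omega),
              List.getElem_set_ne (by omega)]
      · rw [if_neg (by simp [hx2]), if_neg (fun h => hx2 h.2)]
    rw [hget]
    by_cases hmem : j ∈ rest ∧ x = PySem.List.pyGetD P j 0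
    · rw [if_pos hmem, if_pos ⟨List.mem_cons.mpr (Or.inr hmem.1), hmem.2⟩]
    · rw [if_neg hmem]
      by_cases hj : jj = j
      · subst hj
        by_cases hx2 : x = PySem.List.pyGetD P jj 0
        · rw [if_pos ⟨rfl, hx2⟩, if_pos ⟨by simp, hx2⟩]
        · rw [if_neg (fun h => hx2 h.2), if_neg (fun h => hx2 h.2)]
      · rw [if_neg (fun h => hj h.1),
            if_neg (fun h => hmem ⟨(List.mem_cons.mp h.1).resolve_left (fun e => hj e.symm), h.2⟩)]

-- the joint loop invariant of A's (total, marcacoes) and B's seen list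
lemma inv_lemma (P : List Int) (PO : Int) (t : Nat) (ht : (t : Int) ≤ PO) :
    (((PySem.List.pyRange 0 (t : Int)).foldl (aStep P PO)
        (0, (PySem.List.pyRange 0 PO).map (fun _ => (0 : Int)))).2.length = PO.toNat) ∧
    (((PySem.List.pyRange 0 (t : Int)).foldl (aStep P PO)
        (0, (PySem.List.pyRange 0 PO).map (fun _ => (0 : Int)))).1
      = (((PySem.List.pyRange 0 (t : Int)).foldl (bStep P) []).length : Int)) ∧
    (∀ j : Int, 0 ≤ j → j < PO →
      PySem.List.pyGetD ((PySem.List.pyRange 0 (t : Int)).foldl (aStep P PO)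
        (0, (PySem.List.pyRange 0 PO).map (fun _ => (0 : Int)))).2 j 0
      = if altContains (PySem.List.pyGetD P j 0)
            ((PySem.List.pyRange 0 (t : Int)).foldl (bStep P) []) then 1 else 0) := by
  induction t with
  | zero =>
    rw [show ((0 : Nat) : Int) = 0 by norm_num, PySem.List.pyRange_one_eq_nil (le_refl 0)]
    refine ⟨by simp [PySem.List.length_pyRange_one], by simp, ?_⟩
    intro j h0 hj
    rw [PySem.List.pyGetD_eq_getElem _ _ h0 (by simp [PySem.List.length_pyRange_one]; omega)]
    simp [altContains]
  | succ t ih =>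
    have ht' : (t : Int) ≤ PO := by push_cast at ht ⊢; omega
    obtain ⟨ihlen, ihtot, ihpt⟩ := ih ht'
    have hsplit : PySem.List.pyRange 0 ((t + 1 : Nat) : Int)
        = PySem.List.pyRange 0 (t : Int) ++ [(t : Int)] := by
      push_cast
      exact PySem.List.pyRange_one_succ_right (by positivity)
    rw [hsplit, List.foldl_append, List.foldl_append]
    simp only [List.foldl_cons, List.foldl_nil]
    set stA := (PySem.List.pyRange 0 (t : Int)).foldl (aStep P PO)
        (0, (PySem.List.pyRange 0 PO).map (fun _ => (0 : Int))) with hstA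
    set sB := (PySem.List.pyRange 0 (t : Int)).foldl (bStep P) [] with hsB
    have htlt : (t : Int) < PO := by push_cast at ht; omega
    have ht0 : (0 : Int) ≤ (t : Int) := by positivity
    have hcond := ihpt (t : Int) ht0 htlt
    set x := PySem.List.pyGetD P (t : Int) 0 with hx
    by_cases hc : altContains x sB = true
    · -- value already seen: both states unchanged
      have hA : aStep P PO stA (t : Int) = stA := by
        unfold aStep
        rw [hcond, hc]
        simp
      have hB : bStep P sB (t : Int) = sB := by
        show (if altContains x sB = true then sB else sB ++ [x]) = sB
        rw [hc]
        simp
      simp only [hA, hB]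
      exact ⟨ihlen, ihtot, ihpt⟩
    · -- new value: A increments and stamps, B appends
      have hc' : altContains x sB = false := by
        cases h : altContains x sB
        · rfl
        · exact absurd h hc
      have hA : aStep P PO stA (t : Int)
          = (stA.1 + 1, aInner P PO (t : Int) (stA.2.set (t : Int).toNat 1)) := by
        unfold aStep
        rw [hcond, hc']
        simp
      have hB : bStep P sB (t : Int) = sB ++ [x] := by
        show (if altContains x sB = true then sB else sB ++ [x]) = sB ++ [x]
        rw [hc']
        simp
      simp only [hA, hB]
      have hinner : aInner P PO (t : Int) (stA.2.set (t : Int).toNat 1)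
          = (PySem.List.pyRange 0 PO).foldl
              (fun m j => if x == PySem.List.pyGetD P j 0 then m.set j.toNat 1 else m)
              (stA.2.set (t : Int).toNat 1) := by
        unfold aInner; rw [← hx]
      have hsetlen : (stA.2.set (t : Int).toNat 1).length = PO.toNat := by
        simp [ihlen]
      refine ⟨?_, ?_, ?_⟩
      · rw [hinner, innerFold_length, hsetlen]
      · simp [ihtot]
      · intro j h0 hj
        rw [hinner, innerFold_get P x _ (fun j hjm => (PySem.List.mem_pyRange_one.mp hjm).1)
            _ j h0 (by rw [hsetlen]; omega)]
        rw [altContains_append_singleton]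
        have hmem : j ∈ PySem.List.pyRange 0 PO := PySem.List.mem_pyRange_one.mpr ⟨h0, hj⟩
        by_cases hxe : x = PySem.List.pyGetD P j 0
        · rw [if_pos ⟨hmem, hxe⟩]
          have : (PySem.List.pyGetD P j 0 == x) = true := by rw [beq_iff_eq]; exact hxe.symm
          simp [this]
        · rw [if_neg (fun h => hxe h.2)]
          have hbe : (PySem.List.pyGetD P j 0 == x) = false := by
            rw [beq_eq_false_iff_ne]; exact fun h => hxe h.symm
          have hset : PySem.List.pyGetD (stA.2.set (t : Int).toNat 1) j 0
              = PySem.List.pyGetD stA.2 j 0 := by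
            by_cases hjt : j = (t : Int)
            · exact absurd (by rw [hjt]) hxe
            · rw [PySem.List.pyGetD_eq_getElem _ _ h0 (by rw [hsetlen]; omega),
                  PySem.List.pyGetD_eq_getElem _ _ h0 (by rw [ihlen]; omega)]
              rw [List.getElem_set_ne (by omega)]
          rw [hset, ihpt j h0 hj, hbe]
          simp

lemma main_eq (P : List Int) (PO : Int) : indi_dif P PO = indi_dif_alt P PO := by
  unfold indi_dif indi_dif_alt
  by_cases h : PO ≤ 0
  · rw [PySem.List.pyRange_one_eq_nil h]
    simp
  · have h0 : 0 ≤ PO := by omega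
    have := (inv_lemma P PO PO.toNat (by omega)).2.1
    rwa [show ((PO.toNat : Nat) : Int) = PO by omega] at this

-- ===== VERDICT (by name: the statement is the Claim_ definition above) =====
theorem indi_dif_spec : Claim_equal_indi_dif := by
  intro P PO _ _
  unfold Spec_indi_dif
  exact main_eq P PO
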